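-- pv_equiv track=rewrite | github.com/tmddn0920/Algorithm-Hub | Gold/Q_13549.py | bfs
-- ===== SOURCE A (Python) =====
-- from collections import deque
--
-- def bfs(N, K):
--     MAX = 100000
--     A = [-1] * (MAX + 1)
--     q = deque()
--     q.append(N)
--     A[N] = 0
--
--     while q:
--         x = q.popleft()
--         if x == K:
--             return A[x]
--
--
--         nx = x * 2
--         if 0 <= nx <= MAX and (A[nx] == -1 or A[nx] > A[x]):
--             A[nx] = A[x]
--             q.appendleft(nx)
--
--         for nx in (x - 1, x + 1):
--             if 0 <= nx <= MAX and (A[nx] == -1 or A[nx] > A[x] + 1):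
--                 A[nx] = A[x] + 1
--                 q.append(nx)
-- ===== SOURCE B (Python) =====
-- def bfs(N, K):
--     MAX = 100000
--     dist = [-1] * (MAX + 1)
--     dist[N] = 0
--     cur = [N]
--     while cur:
--         nxt = []
--         for y in cur:
--             while True:
--                 if y == K:
--                     return dist[y]
--                 d = dist[y]
--                 y2 = y * 2
--                 step = 0 <= y2 <= MAX and (dist[y2] == -1 or dist[y2] > d)
--                 if step:
--                     dist[y2] = d
--                 for z in (y - 1, y + 1):
--                     if 0 <= z <= MAX and (dist[z] == -1 or dist[z] > d + 1):
--                         dist[z] = d + 1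
--                         nxt.append(z)
--                 if not step:
--                     break
--                 y = y2
--         cur = nxt
-- ===== Notes on version B (the rewrite author's own statement) =====
-- stated objective: alternative
-- what changed: Replaces A's deque-based 0/1-BFS (appendleft for free doubling edges, one mixed queue) by a level-synchronous BFS over plain cur/nxt level lists that walks each free doubling chain inline in an inner loop; no deque is used.
-- outside the precondition, e.g. on bfs(-1, 5): A returns 3, B returns 3; on bfs(0, 100001): A returns None, B returns None; on bfs(200000, 5): A raises IndexError, B raises IndexError
import Mathlib
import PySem

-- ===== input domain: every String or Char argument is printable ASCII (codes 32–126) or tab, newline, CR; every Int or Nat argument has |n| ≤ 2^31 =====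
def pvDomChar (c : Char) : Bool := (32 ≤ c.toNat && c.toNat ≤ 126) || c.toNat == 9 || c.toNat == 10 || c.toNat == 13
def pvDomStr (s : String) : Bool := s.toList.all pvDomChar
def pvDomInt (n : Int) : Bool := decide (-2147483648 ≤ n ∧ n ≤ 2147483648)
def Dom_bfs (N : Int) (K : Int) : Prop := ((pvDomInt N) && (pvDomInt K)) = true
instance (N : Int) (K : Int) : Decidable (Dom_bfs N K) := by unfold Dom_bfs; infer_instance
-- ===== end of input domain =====

-- B replaces A's deque-based 0/1-BFS by a level-synchronous BFS (plain cur/nxt level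
-- lists, walking each free doubling chain inline); same return value, similar cost
-- (objective: alternative).

-- ===== PORT A =====
-- A's array A is an Array Int of length 100001; all reads/writes are guarded by
-- 0 ≤ i ≤ 100000 (ensured by Pre_bfs for the initial A[N] = 0), so getD/setIfInBounds
-- are exact there.  A's deque is the standard functional queue (front, back with back
-- reversed): popleft/appendleft act on front, append conses onto back, refill on empty
-- front reverses back — exact for the value at every step.  The while loop is ported
-- with a fuel counter (one unit per popped element); 1000000 exceeds the number of pops
-- of any run on the Pre_ domain (at most two enqueues per cell of the 100001 array).
def relaxA (arr : Array Int) (dx : Int) (z : Int) (back : List Int) : Array Int × List Int :=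
  if 0 ≤ z ∧ z ≤ 100000 ∧ ((arr.getD z.toNat 0) = -1 ∨ (arr.getD z.toNat 0) > dx + 1)
  then ((arr.setIfInBounds z.toNat (dx + 1)), z :: back)
  else (arr, back)

def popA (front back : List Int) : Option (Int × List Int × List Int) :=
  match front with
  | x :: f => some (x, f, back)
  | [] =>
    match back.reverse with
    | [] => none
    | x :: f => some (x, f, [])

def runA (K : Int) : Nat → Array Int → List Int → List Int → Int
  | 0, _, _, _ => -1
  | fuel+1, arr, front0, back0 =>
    match popA front0 back0 with
    | none => -1
    | some (x, front, back) =>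
      if x = K then arr.getD x.toNat 0
      else
        let dx := arr.getD x.toNat 0
        let nx := x * 2
        let fb :=
          if 0 ≤ nx ∧ nx ≤ 100000 ∧ ((arr.getD nx.toNat 0) = -1 ∨ (arr.getD nx.toNat 0) > dx)
          then ((arr.setIfInBounds nx.toNat dx), nx :: front)
          else (arr, front)
        let r1 := relaxA fb.1 dx (x - 1) back
        let r2 := relaxA r1.1 dx (x + 1) r1.2
        runA K fuel r2.1 fb.2 r2.2

def bfs (N : Int) (K : Int) : Int :=
  runA K 1000000 ((Array.replicate 100001 (-1 : Int)).setIfInBounds N.toNat 0) [N] []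

-- ===== PORT B =====
-- Source B's nested loops (for y in cur / inner doubling-chain while) are transcribed as one
-- tail-recursive step function: `st.1` is Source B's `step` flag, the chain continues with
-- y2, the `for y in cur` advance pops the next element of cur, and the level change
-- `cur = nxt` reverses the cons-accumulated nxt (Python's list.append is ported as the
-- standard reversed accumulator — same list values at each swap).  Same fuel discipline
-- as A's port: one unit per processed node.
def relaxB (arr : Array Int) (d : Int) (z : Int) (nxt : List Int) : Array Int × List Int :=
  if 0 ≤ z ∧ z ≤ 100000 ∧ ((arr.getD z.toNat 0) = -1 ∨ (arr.getD z.toNat 0) > d + 1)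
  then ((arr.setIfInBounds z.toNat (d + 1)), z :: nxt)
  else (arr, nxt)

def stepB (K : Int) : Nat → Array Int → Int → List Int → List Int → Int
  | 0, _, _, _, _ => -1
  | fuel+1, arr, y, cur, nxt =>
    if y = K then arr.getD y.toNat 0
    else
      let d := arr.getD y.toNat 0
      let y2 := y * 2
      let st :=
        if 0 ≤ y2 ∧ y2 ≤ 100000 ∧ ((arr.getD y2.toNat 0) = -1 ∨ (arr.getD y2.toNat 0) > d)
        then (true, arr.setIfInBounds y2.toNat d)
        else (false, arr)
      let r1 := relaxB st.2 d (y - 1) nxt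
      let r2 := relaxB r1.1 d (y + 1) r1.2
      if st.1 then stepB K fuel r2.1 y2 cur r2.2
      else
        match cur with
        | x :: cur' => stepB K fuel r2.1 x cur' r2.2
        | [] =>
          match r2.2.reverse with
          | [] => -1
          | x :: cur' => stepB K fuel r2.1 x cur' []

def bfs_alt (N : Int) (K : Int) : Int :=
  stepB K 1000000 ((Array.replicate 100001 (-1 : Int)).setIfInBounds N.toNat 0) N [] []

-- ===== PRECONDITION & SPEC =====
-- Pre_ restricts to the problem's natural domain 0..100000 (BOJ 13549): outside it A
-- raises IndexError (N < -100001 or N > 100000), returns None — no int — when K is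
-- unreachable (K outside 0..100000), or returns a value only via Python's accidental
-- negative-index wraparound (-100001 ≤ N ≤ -1), an artefact of A's list indexing.
def Pre_bfs (N : Int) (K : Int) : Prop :=
  0 ≤ N ∧ N ≤ 100000 ∧ 0 ≤ K ∧ K ≤ 100000
instance (N : Int) (K : Int) : Decidable (Pre_bfs N K) := by unfold Pre_bfs; infer_instance
def pvWitness_bfs : Int × Int := (5, 14)

def Spec_bfs (N : Int) (K : Int) (out : Int) : Prop := out = bfs_alt N K
instance (N : Int) (K : Int) (out : Int) : Decidable (Spec_bfs N K out) := by unfold Spec_bfs; infer_instance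

-- ===== CLAIM (what is proved, stated in full; the proofs are below) =====
def Claim_equal_bfs : Prop := ∀ (N : Int) (K : Int), Dom_bfs N K → Pre_bfs N K → Spec_bfs N K (bfs N K)

-- ===== LEMMAS AND PROOFS =====

-- relaxA and relaxB are the same relaxation of a ±1 neighbour.
theorem relaxAB (arr : Array Int) (d z : Int) (l : List Int) :
    relaxA arr d z l = relaxB arr d z l := rfl

-- Refilling A's queue from the back list is the same as running on the reversed back.
theorem runA_refill (K : Int) (g : Nat) (arr : Array Int) (back : List Int) :
    runA K (g+1) arr [] back = runA K (g+1) arr back.reverse [] := by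
  rcases h : back.reverse with _ | ⟨x, c⟩ <;> simp [runA, popA, h]

-- Simulation: A's deque run, with the head element x split off, equals B's step
-- function processing x with the rest of the current level `cur` and next level `nxt`.
theorem runA_eq_stepB (f : Nat) : ∀ (K : Int) (arr : Array Int) (x : Int)
    (cur nxt : List Int), runA K f arr (x :: cur) nxt = stepB K f arr x cur nxt := by
  induction f with
  | zero => intro K arr x cur nxt; rfl
  | succ g ih =>
    intro K arr x cur nxt
    by_cases hK : x = K
    · simp [runA, stepB, popA, hK]
    · by_cases hc : 0 ≤ x * 2 ∧ x * 2 ≤ 100000 ∧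
        ((arr.getD (x * 2).toNat 0) = -1 ∨ (arr.getD (x * 2).toNat 0) > arr.getD x.toNat 0)
      · simp only [runA, stepB, popA, relaxAB, hK, if_pos hc, if_true]
        exact ih _ _ _ _ _
      · simp only [runA, stepB, popA, relaxAB, hK, if_neg hc, if_false]
        rcases g with _ | g'
        · rcases cur with _ | ⟨x', c⟩
          · rcases h2 : (relaxB (relaxB arr (arr.getD x.toNat 0) (x - 1) nxt).1
              (arr.getD x.toNat 0) (x + 1) (relaxB arr (arr.getD x.toNat 0) (x - 1) nxt).2).2.reverse with
              _ | ⟨x', c⟩ <;> simp [runA, stepB]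
          · rfl
        · rcases cur with _ | ⟨x', c⟩
          · rw [runA_refill]
            rcases h2 : (relaxB (relaxB arr (arr.getD x.toNat 0) (x - 1) nxt).1
              (arr.getD x.toNat 0) (x + 1) (relaxB arr (arr.getD x.toNat 0) (x - 1) nxt).2).2.reverse with
              _ | ⟨x', c⟩
            · simp [runA, popA]
            · exact ih _ _ _ _ _
          · exact ih _ _ _ _ _

-- ===== VERDICT (by name: the statement is the Claim_ definition above) =====
theorem bfs_spec : Claim_equal_bfs := by
  intro N K _ _
  unfold Spec_bfs bfs bfs_alt
  exact runA_eq_stepB 1000000 K _ N [] []
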